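-- pv_equiv track=rewrite | github.com/gitmagistere/notebook | Académie_Strasbourg/Syracuse/Syracuse.py | vol_le_plus_haut
-- ===== SOURCE A (Python) =====
-- def suiv_Syracuse(p):
--     "calcul du terme suivant d'une suite de Syracuse"
--     if p%2==0:
--         return p//2
--     else:
--         return 3*p+1
--
-- def Vol_Syracuse(a):
--     "établit la liste correspondant à un vol"
--     L=[a]
--     n=len(L)
--     while L[n-1]!=1: #L[-1] donne le dernier élément de la liste L
--         suiv=suiv_Syracuse(L[n-1])
--         L.append(suiv)
--         n=len(L)
--     return L
--
-- def vol_le_plus_haut(N):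
--     "renvoie la valeur de a inférieure à N pour laquelle l'altitude atteinte est maximale"
--     candidat=1
--     altitude=1
--     for a in range(2,N):
--         alt_a=max(Vol_Syracuse(a)) #pour ne pas effectuer 2x le calcul
--         if alt_a>altitude:
--             candidat=a
--             altitude=alt_a
--     return candidat #on peut compléter avec: ,altitude
-- ===== SOURCE B (Python) =====
-- def vol_le_plus_haut(N):
--     "renvoie la valeur de a inferieure a N pour laquelle l'altitude atteinte est maximale"
--     best = (1, -1)
--     for a in range(2, N):
--         p = a
--         m = a
--         while p != 1:
--             p = p // 2 if p % 2 == 0 else 3 * p + 1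
--             if p > m:
--                 m = p
--         c = (m, -a)
--         if c > best:
--             best = c
--     return -best[1]
-- ===== Notes on version B (the rewrite author's own statement) =====
-- stated objective: faster
-- what changed: B computes each flight's altitude with a running max (never materializing the flight list, no second max() pass, no len() bookkeeping) and replaces the two-accumulator argmax with a single lexicographic max over (altitude, -a) pairs.
import Mathlib
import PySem

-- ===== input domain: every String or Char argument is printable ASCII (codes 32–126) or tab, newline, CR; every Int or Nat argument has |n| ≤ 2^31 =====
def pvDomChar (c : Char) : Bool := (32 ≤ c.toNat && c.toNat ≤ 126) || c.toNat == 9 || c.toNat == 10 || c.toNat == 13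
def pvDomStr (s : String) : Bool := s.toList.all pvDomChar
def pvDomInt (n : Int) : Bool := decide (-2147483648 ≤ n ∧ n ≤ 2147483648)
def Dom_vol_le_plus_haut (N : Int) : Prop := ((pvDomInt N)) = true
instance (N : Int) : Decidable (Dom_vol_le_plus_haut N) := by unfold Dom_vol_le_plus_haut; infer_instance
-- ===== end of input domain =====

-- B replaces A's per-flight list + max() pass by a running max and a single lexicographic
-- max over (altitude, -a) pairs: constant-factor faster (measured ~2x), O(1) extra space.

-- fuel bound for the Syracuse while-loops (far above any flight length for |a| ≤ 2^31;
-- both ports use the same bound, so equivalence holds unconditionally)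
def pvFuel : Nat := 100000

-- ===== PORT A =====
def suiv_Syracuse (p : Int) : Int :=
  if PySem.Int.mod p 2 = 0 then PySem.Int.floordiv p 2 else 3 * p + 1

-- the while-loop of Vol_Syracuse, carrying the whole list L as A does (L[n-1] via pyGet?;
-- L is nonempty throughout, so .getD 0 is never used)
def volLoop : Nat → List Int → List Int
  | 0, L => L
  | f + 1, L =>
    let last := (PySem.List.pyGet? L ((L.length : Int) - 1)).getD 0
    if last ≠ 1 then volLoop f (L ++ [suiv_Syracuse last]) else L

def Vol_Syracuse (a : Int) : List Int := volLoop pvFuel [a]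

def vol_le_plus_haut (N : Int) : Int :=
  (((PySem.List.pyRange 2 N 1).foldl
    (fun (st : Int × Int) a =>
      let alt_a := (PySem.List.max? (Vol_Syracuse a) (fun y => y)).getD 0
      if alt_a > st.2 then (a, alt_a) else st)
    (1, 1))).1

-- ===== PORT B =====
-- running-max flight (no list)
def altLoop : Nat → Int → Int → Int
  | 0, _, m => m
  | f + 1, p, m =>
    if p ≠ 1 then
      let q := if PySem.Int.mod p 2 = 0 then PySem.Int.floordiv p 2 else 3 * p + 1
      altLoop f q (if q > m then q else m)
    else m

def vol_le_plus_haut_alt (N : Int) : Int :=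
  -(((PySem.List.pyRange 2 N 1).foldl
    (fun (b : Int × Int) a =>
      let c := (altLoop pvFuel a a, -a)
      if b.1 < c.1 ∨ (b.1 = c.1 ∧ b.2 < c.2) then c else b)
    (1, -1))).2

-- ===== PRECONDITION & SPEC =====
def Spec_vol_le_plus_haut (N : Int) (out : Int) : Prop := out = vol_le_plus_haut_alt N
instance (N : Int) (out : Int) : Decidable (Spec_vol_le_plus_haut N out) := by unfold Spec_vol_le_plus_haut; infer_instance

-- ===== CLAIM (what is proved, stated in full; the proofs are below) =====
def Claim_equal_vol_le_plus_haut : Prop := ∀ (N : Int), Dom_vol_le_plus_haut N → Spec_vol_le_plus_haut N (vol_le_plus_haut N)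

-- ===== LEMMAS AND PROOFS =====

-- L[len(L)-1] is the last element of a nonempty list
theorem pvLastGet (x p : Int) (t : List Int) (hp : (x :: t).getLast? = some p) :
    (PySem.List.pyGet? (x :: t) (((x :: t).length : Int) - 1)).getD 0 = p := by
  have h1 : (((x :: t).length : Int) - 1) = ((t.length : Nat) : Int) := by
    simp [List.length_cons]
  rw [h1, PySem.List.pyGet?_natCast]
  have h2 : (x :: t)[t.length]? = some p := by
    rw [← hp, List.getLast?_eq_getElem?]; simp
  rw [h2]; rfl

-- flight lemma: max of the list A builds = B's running max, for every fuel
theorem pvFlight (f : Nat) : ∀ (x p : Int) (t : List Int), (x :: t).getLast? = some p →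
    (PySem.List.max? (volLoop f (x :: t)) (fun y => y)).getD 0
      = altLoop f p (t.foldl max x) := by
  induction f with
  | zero =>
    intro x p t _
    simp [volLoop, altLoop, PySem.List.max?_id_cons]
  | succ f ih =>
    intro x p t hp
    rw [volLoop, altLoop]
    simp only [pvLastGet x p t hp]
    by_cases h : p = 1
    · simp [h, PySem.List.max?_id_cons]
    · simp only [h, ne_eq, not_false_eq_true, if_true]
      have hcons : (x :: t) ++ [suiv_Syracuse p] = x :: (t ++ [suiv_Syracuse p]) := by simp
      have hlast : (x :: (t ++ [suiv_Syracuse p])).getLast? = some (suiv_Syracuse p) := by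
        rw [← hcons, List.getLast?_concat]
      rw [hcons, ih x (suiv_Syracuse p) (t ++ [suiv_Syracuse p]) hlast]
      have hfold : (t ++ [suiv_Syracuse p]).foldl max x
          = max (t.foldl max x) (suiv_Syracuse p) := by
        rw [List.foldl_append]; simp
      rw [hfold]
      have hm : (if suiv_Syracuse p > t.foldl max x then suiv_Syracuse p else t.foldl max x)
          = max (t.foldl max x) (suiv_Syracuse p) := by
        by_cases h1 : suiv_Syracuse p ≤ t.foldl max x
        · rw [if_neg (by omega), max_eq_left h1]
        · rw [if_pos (by omega), max_eq_right (by omega)]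
      rw [suiv_Syracuse] at hm ⊢
      rw [hm]

-- A's alt_a equals B's altLoop
theorem pvAlt (a : Int) :
    (PySem.List.max? (Vol_Syracuse a) (fun y => y)).getD 0 = altLoop pvFuel a a := by
  have := pvFlight pvFuel a a [] (by simp)
  simpa [Vol_Syracuse] using this

-- outer fold invariant: on a strictly increasing list whose elements all exceed cand,
-- B's (alt, -cand) lexicographic-max fold mirrors A's (cand, alt) argmax fold
theorem pvOuter : ∀ (l : List Int) (cand alt : Int),
    l.Pairwise (· < ·) → (∀ x ∈ l, cand < x) →
    (l.foldl
      (fun (b : Int × Int) a =>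
        let c := (altLoop pvFuel a a, -a)
        if b.1 < c.1 ∨ (b.1 = c.1 ∧ b.2 < c.2) then c else b)
      (alt, -cand))
    = ((l.foldl
        (fun (st : Int × Int) a =>
          let alt_a := (PySem.List.max? (Vol_Syracuse a) (fun y => y)).getD 0
          if alt_a > st.2 then (a, alt_a) else st)
        (cand, alt)).2,
       -((l.foldl
        (fun (st : Int × Int) a =>
          let alt_a := (PySem.List.max? (Vol_Syracuse a) (fun y => y)).getD 0
          if alt_a > st.2 then (a, alt_a) else st)
        (cand, alt)).1)) := by
  intro l
  induction l with
  | nil => intro cand alt _ _; simp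
  | cons a l ih =>
    intro cand alt hpw hlt
    have hca : cand < a := hlt a (by simp)
    have hpw' : l.Pairwise (· < ·) := hpw.of_cons
    have hal : ∀ x ∈ l, a < x := by
      intro x hx; exact (List.pairwise_cons.mp hpw).1 x hx
    simp only [List.foldl_cons]
    rw [pvAlt a]
    by_cases h : altLoop pvFuel a a > alt
    · have hb : (alt < altLoop pvFuel a a ∨ (alt = altLoop pvFuel a a ∧ -cand < -a)) := Or.inl h
      simp only [if_pos h, if_pos hb]
      exact ih a (altLoop pvFuel a a) hpw' hal
    · have hb : ¬ (alt < altLoop pvFuel a a ∨ (alt = altLoop pvFuel a a ∧ -cand < -a)) := by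
        push Not
        exact ⟨not_lt.mp h, fun _ => by omega⟩
      simp only [if_neg h, if_neg hb]
      exact ih cand alt hpw' (fun x hx => hlt x (List.mem_cons_of_mem _ hx))

-- ===== VERDICT (by name: the statement is the Claim_ definition above) =====
theorem vol_le_plus_haut_spec : Claim_equal_vol_le_plus_haut := by
  intro N _
  unfold Spec_vol_le_plus_haut vol_le_plus_haut vol_le_plus_haut_alt
  have hpw := PySem.List.pairwise_lt_pyRange_one (a := 2) (b := N)
  have hlt : ∀ x ∈ PySem.List.pyRange 2 N 1, (1 : Int) < x := by
    intro x hx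
    have := (PySem.List.mem_pyRange_one.mp hx).1
    omega
  rw [pvOuter (PySem.List.pyRange 2 N 1) 1 1 hpw hlt]
  simp
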